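-- pv_equiv track=rewrite | github.com/PedroDreyer/modelo-competitivo-fintech-nps | scripts/analisis_automatico.py | _buscar_noticia_relacionada
-- ===== SOURCE A (Python) =====
-- from typing import List, Dict, Any, Optional, Tuple
--
-- MAPEO_NOTICIA_QUEJA = {
--     'Financiamiento': ['Financiamiento', 'Crédito', 'Tarjeta'],
--     'Rendimientos': ['Rendimientos', 'Inversiones', 'Ahorro'],
--     'Seguridad': ['Seguridad', 'Fraude', 'Estafa'],
--     'Atención': ['Atención', 'Soporte', 'Servicio'],
--     'Funcionalidades': ['Funcionalidades', 'App', 'Tecnología'],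
--     'Complejidad': ['Complejidad', 'Usabilidad', 'Dificultad'],
--     'Promociones': ['Promociones', 'Beneficios', 'Descuentos'],
-- }
--
-- def _buscar_noticia_relacionada(quejas_rel: List[str], noticias: List[Dict]) -> Dict:
--     """
--     Busca noticia relacionada con las quejas usando matching flexible.
--     """
--     if not noticias or not quejas_rel:
--         return None
--
--     for noticia in noticias:
--         cat_noticia = noticia.get('categoria_relacionada', '').lower()
--
--         # Match directo con categoría de noticia
--         for queja in quejas_rel:
--             queja_lower = queja.lower()
--             if queja_lower in cat_noticia or cat_noticia in queja_lower:
--                 return noticia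
--
--         # Match con mapeo de noticias a quejas
--         for queja in quejas_rel:
--             queja_lower = queja.lower()
--             for cat_key, cats_relacionadas in MAPEO_NOTICIA_QUEJA.items():
--                 if queja_lower in cat_key.lower():
--                     for cat_rel in cats_relacionadas:
--                         if cat_rel.lower() in cat_noticia:
--                             return noticia
--
--     return None
-- ===== SOURCE B (Python) =====
-- MAPEO_NOTICIA_QUEJA = {
--     'Financiamiento': ['Financiamiento', 'Crédito', 'Tarjeta'],
--     'Rendimientos': ['Rendimientos', 'Inversiones', 'Ahorro'],
--     'Seguridad': ['Seguridad', 'Fraude', 'Estafa'],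
--     'Atención': ['Atención', 'Soporte', 'Servicio'],
--     'Funcionalidades': ['Funcionalidades', 'App', 'Tecnología'],
--     'Complejidad': ['Complejidad', 'Usabilidad', 'Dificultad'],
--     'Promociones': ['Promociones', 'Beneficios', 'Descuentos'],
-- }
--
-- def _buscar_noticia_relacionada(quejas_rel, noticias):
--     """Same result as A: precompute the lowered quejas and the mapped target
--     substrings once, then scan noticias a single time."""
--     if not noticias or not quejas_rel:
--         return None
--     quejas_low = [q.lower() for q in quejas_rel]
--     targets = []
--     for ql in quejas_low:
--         for cat_key, cats in MAPEO_NOTICIA_QUEJA.items():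
--             if ql in cat_key.lower():
--                 targets.extend(c.lower() for c in cats)
--     for noticia in noticias:
--         cat = noticia.get('categoria_relacionada', '').lower()
--         if any(ql in cat or cat in ql for ql in quejas_low) or any(t in cat for t in targets):
--             return noticia
--     return None
-- ===== Notes on version B (the rewrite author's own statement) =====
-- stated objective: alternative
-- what changed: B expands each queja through MAPEO_NOTICIA_QUEJA once, before the loop, into a flat list of lowered target substrings, so the per-noticia work is a single predicate (direct dual substring test or a precomputed target hit) instead of re-walking the mapping table for every noticia.
import Mathlib
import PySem

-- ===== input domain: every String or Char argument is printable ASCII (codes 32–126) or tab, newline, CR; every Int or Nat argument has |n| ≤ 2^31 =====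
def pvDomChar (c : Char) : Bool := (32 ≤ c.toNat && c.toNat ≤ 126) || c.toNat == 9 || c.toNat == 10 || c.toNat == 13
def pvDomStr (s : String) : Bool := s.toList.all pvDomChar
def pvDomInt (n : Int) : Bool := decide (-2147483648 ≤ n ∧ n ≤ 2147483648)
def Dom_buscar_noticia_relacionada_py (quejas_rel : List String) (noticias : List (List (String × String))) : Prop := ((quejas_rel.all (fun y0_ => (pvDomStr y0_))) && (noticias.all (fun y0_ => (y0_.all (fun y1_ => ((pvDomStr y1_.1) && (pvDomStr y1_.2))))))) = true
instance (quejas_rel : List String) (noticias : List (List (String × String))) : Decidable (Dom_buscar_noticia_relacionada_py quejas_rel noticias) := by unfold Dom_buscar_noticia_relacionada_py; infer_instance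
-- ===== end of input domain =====

-- B precomputes the MAPEO-expanded target substrings once before scanning noticias;
-- A re-walks the mapping table inside the noticia loop. Return values are identical.

-- the module constant MAPEO_NOTICIA_QUEJA (shared data table, used by both ports)
def pvMapeo : List (String × List String) :=
  [("Financiamiento", ["Financiamiento", "Crédito", "Tarjeta"]),
   ("Rendimientos", ["Rendimientos", "Inversiones", "Ahorro"]),
   ("Seguridad", ["Seguridad", "Fraude", "Estafa"]),
   ("Atención", ["Atención", "Soporte", "Servicio"]),
   ("Funcionalidades", ["Funcionalidades", "App", "Tecnología"]),
   ("Complejidad", ["Complejidad", "Usabilidad", "Dificultad"]),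
   ("Promociones", ["Promociones", "Beneficios", "Descuentos"])]

-- ===== PORT A =====
-- 'for queja in quejas_rel: if queja_lower in cat or cat in queja_lower: return noticia'
def pvA_direct (quejas : List String) (cat : String) : Bool :=
  match quejas with
  | [] => false
  | q :: rest =>
    let ql := PySem.Str.lower q
    if PySem.Str.isIn ql cat || PySem.Str.isIn cat ql then true else pvA_direct rest cat

-- 'for cat_rel in cats_relacionadas: if cat_rel.lower() in cat_noticia: return noticia'
def pvA_inner (cats : List String) (cat : String) : Bool :=
  match cats with
  | [] => false
  | r :: rest => if PySem.Str.isIn (PySem.Str.lower r) cat then true else pvA_inner rest cat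

-- 'for cat_key, cats_relacionadas in MAPEO_NOTICIA_QUEJA.items(): …'
def pvA_keys (m : List (String × List String)) (ql cat : String) : Bool :=
  match m with
  | [] => false
  | (k, cats) :: rest =>
    if PySem.Str.isIn ql (PySem.Str.lower k) then
      if pvA_inner cats cat then true else pvA_keys rest ql cat
    else pvA_keys rest ql cat

-- second 'for queja in quejas_rel' loop (mapping phase)
def pvA_mapeo (quejas : List String) (cat : String) : Bool :=
  match quejas with
  | [] => false
  | q :: rest =>
    if pvA_keys pvMapeo (PySem.Str.lower q) cat then true else pvA_mapeo rest cat

-- 'for noticia in noticias: …'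
def pvA_loop (quejas : List String) (noticias : List (List (String × String))) : Option (List (String × String)) :=
  match noticias with
  | [] => none
  | n :: rest =>
    let cat := PySem.Str.lower ((PySem.Dict.mk n).getD "categoria_relacionada" "")
    if pvA_direct quejas cat then some n
    else if pvA_mapeo quejas cat then some n
    else pvA_loop quejas rest

def buscar_noticia_relacionada_py (quejas_rel : List String) (noticias : List (List (String × String))) : Option (List (String × String)) :=
  if noticias = [] ∨ quejas_rel = [] then none
  else pvA_loop quejas_rel noticias

-- ===== PORT B =====
-- targets: every lowered cat_rel of every MAPEO entry whose key contains some lowered queja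
def pvB_targets (quejasLow : List String) : List String :=
  quejasLow.foldl (fun acc ql =>
    pvMapeo.foldl (fun acc2 p =>
      if PySem.Str.isIn ql (PySem.Str.lower p.1) then acc2 ++ p.2.map PySem.Str.lower else acc2) acc) []

def pvB_pred (quejasLow targets : List String) (n : List (String × String)) : Bool :=
  let cat := PySem.Str.lower ((PySem.Dict.mk n).getD "categoria_relacionada" "")
  quejasLow.any (fun ql => PySem.Str.isIn ql cat || PySem.Str.isIn cat ql)
    || targets.any (fun t => PySem.Str.isIn t cat)

def buscar_noticia_relacionada_py_alt (quejas_rel : List String) (noticias : List (List (String × String))) : Option (List (String × String)) :=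
  if noticias = [] ∨ quejas_rel = [] then none
  else
    let quejasLow := quejas_rel.map PySem.Str.lower
    let targets := pvB_targets quejasLow
    noticias.find? (pvB_pred quejasLow targets)

-- ===== PRECONDITION & SPEC =====
def Spec_buscar_noticia_relacionada_py (quejas_rel : List String) (noticias : List (List (String × String))) (out : Option (List (String × String))) : Prop := out = buscar_noticia_relacionada_py_alt quejas_rel noticias
instance (quejas_rel : List String) (noticias : List (List (String × String))) (out : Option (List (String × String))) : Decidable (Spec_buscar_noticia_relacionada_py quejas_rel noticias out) := by unfold Spec_buscar_noticia_relacionada_py; infer_instance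

-- ===== CLAIM (what is proved, stated in full; the proofs are below) =====
def Claim_equal_buscar_noticia_relacionada_py : Prop := ∀ (quejas_rel : List String) (noticias : List (List (String × String))), Dom_buscar_noticia_relacionada_py quejas_rel noticias → Spec_buscar_noticia_relacionada_py quejas_rel noticias (buscar_noticia_relacionada_py quejas_rel noticias)

-- ===== LEMMAS AND PROOFS =====

-- A's direct phase is B's 'any' over the lowered quejas
theorem pvA_direct_eq (quejas : List String) (cat : String) :
    pvA_direct quejas cat
      = (quejas.map PySem.Str.lower).any (fun ql => PySem.Str.isIn ql cat || PySem.Str.isIn cat ql) := by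
  induction quejas with
  | nil => rfl
  | cons q rest ih => simp [pvA_direct, ih]

theorem pvA_inner_eq (cats : List String) (cat : String) :
    pvA_inner cats cat = (cats.map PySem.Str.lower).any (fun t => PySem.Str.isIn t cat) := by
  induction cats with
  | nil => rfl
  | cons r rest ih => simp [pvA_inner, ih]

theorem pvA_keys_eq (m : List (String × List String)) (ql cat : String) :
    pvA_keys m ql cat
      = m.any (fun p => PySem.Str.isIn ql (PySem.Str.lower p.1)
          && (p.2.map PySem.Str.lower).any (fun t => PySem.Str.isIn t cat)) := by
  induction m with
  | nil => rfl
  | cons p rest ih =>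
    obtain ⟨k, cats⟩ := p
    simp only [pvA_keys, List.any_cons, ← ih, pvA_inner_eq]
    by_cases h : PySem.Str.isIn ql (PySem.Str.lower k) = true
    · rw [if_pos h]
      by_cases h2 : (cats.map PySem.Str.lower).any (fun t => PySem.Str.isIn t cat) = true
      · rw [if_pos h2]; simp_all
      · rw [if_neg h2]; simp_all
    · simp_all

-- the inner fold of pvB_targets, read through 'any'
theorem targets_inner_any (m : List (String × List String)) (ql cat : String) (acc : List String) :
    ((m.foldl (fun acc2 p =>
        if PySem.Str.isIn ql (PySem.Str.lower p.1) then acc2 ++ p.2.map PySem.Str.lower else acc2) acc).any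
      (fun t => PySem.Str.isIn t cat))
    = (acc.any (fun t => PySem.Str.isIn t cat)
        || m.any (fun p => PySem.Str.isIn ql (PySem.Str.lower p.1)
            && (p.2.map PySem.Str.lower).any (fun t => PySem.Str.isIn t cat))) := by
  induction m generalizing acc with
  | nil => simp
  | cons p rest ih =>
    simp only [List.foldl_cons, List.any_cons, ih]
    by_cases h : PySem.Str.isIn ql (PySem.Str.lower p.1) = true
    · rw [if_pos h]
      simp_all [List.any_append, Bool.or_assoc]
    · rw [if_neg h]
      simp_all

-- A's second quejas loop, as an 'any'
theorem pvA_mapeo_any (quejas : List String) (cat : String) :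
    pvA_mapeo quejas cat = quejas.any (fun q => pvA_keys pvMapeo (PySem.Str.lower q) cat) := by
  induction quejas with
  | nil => rfl
  | cons q rest ih =>
    simp only [pvA_mapeo, List.any_cons, ih]
    by_cases h : pvA_keys pvMapeo (PySem.Str.lower q) cat = true
    · simp [h]
    · simp only [Bool.not_eq_true] at h
      simp [h]

-- A's whole mapping phase is B's 'any target is a substring of cat'
theorem pvA_mapeo_eq (quejas : List String) (cat : String) :
    pvA_mapeo quejas cat
      = (pvB_targets (quejas.map PySem.Str.lower)).any (fun t => PySem.Str.isIn t cat) := by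
  have h : ∀ (qs : List String) (acc : List String),
      ((qs.foldl (fun acc ql => pvMapeo.foldl (fun acc2 p =>
          if PySem.Str.isIn ql (PySem.Str.lower p.1) then acc2 ++ p.2.map PySem.Str.lower else acc2) acc) acc).any
        (fun t => PySem.Str.isIn t cat))
      = (acc.any (fun t => PySem.Str.isIn t cat) || qs.any (fun ql => pvA_keys pvMapeo ql cat)) := by
    intro qs
    induction qs with
    | nil => simp
    | cons ql rest ih =>
      intro acc
      simp only [List.foldl_cons, List.any_cons, ih, targets_inner_any, pvA_keys_eq,
        Bool.or_assoc]
  rw [pvA_mapeo_any, pvB_targets, h, List.any_map]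
  rfl

-- the noticia loop of A is B's find?
theorem pvA_loop_eq (quejas : List String) (noticias : List (List (String × String))) :
    pvA_loop quejas noticias
      = noticias.find? (pvB_pred (quejas.map PySem.Str.lower) (pvB_targets (quejas.map PySem.Str.lower))) := by
  induction noticias with
  | nil => rfl
  | cons n rest ih =>
    simp only [pvA_loop, List.find?_cons, ih]
    have hpred : pvB_pred (quejas.map PySem.Str.lower) (pvB_targets (quejas.map PySem.Str.lower)) n
        = (pvA_direct quejas (PySem.Str.lower ((PySem.Dict.mk n).getD "categoria_relacionada" ""))
            || pvA_mapeo quejas (PySem.Str.lower ((PySem.Dict.mk n).getD "categoria_relacionada" ""))) := by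
      simp [pvB_pred, pvA_direct_eq, pvA_mapeo_eq]
    rw [hpred]
    by_cases h1 : pvA_direct quejas (PySem.Str.lower ((PySem.Dict.mk n).getD "categoria_relacionada" "")) = true <;>
      by_cases h2 : pvA_mapeo quejas (PySem.Str.lower ((PySem.Dict.mk n).getD "categoria_relacionada" "")) = true <;>
      simp [h1, h2]

-- ===== VERDICT (by name: the statement is the Claim_ definition above) =====
theorem buscar_noticia_relacionada_py_spec : Claim_equal_buscar_noticia_relacionada_py := by
  intro quejas noticias _
  unfold Spec_buscar_noticia_relacionada_py buscar_noticia_relacionada_py buscar_noticia_relacionada_py_alt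
  split_ifs with h
  · rfl
  · exact pvA_loop_eq quejas noticias
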